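-- pv_equiv track=rewrite | github.com/sieczkah/Codewars_KATA | 6 kyu/Backwards Read Primes.py | backwards_prime
-- ===== SOURCE A (Python) =====
-- import math
--
-- def is_prime(num):
--     for i in range(2, round(math.sqrt(num)) + 1):
--         if num % i == 0:
--             return False
--     return True
--
-- def backwards_prime(start, stop):
--     primes = [num for num in range(start, stop +1) if is_prime(num)]
--     back_primes = []
--     for prime in primes:
--         back_p = int(str(prime)[::-1])
--         # checking if prime backwards is prime and it's not a palindrome
--         if is_prime(back_p) and back_p != prime:
--             back_primes.append(prime)
--     return back_primes
-- ===== SOURCE B (Python) =====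
-- import math
--
-- def _isp(v, primes):
--     # trial division by precomputed primes only; True for v < 4 (incl. 0 and 1, like A's is_prime)
--     for p in primes:
--         if p * p > v:
--             break
--         if v % p == 0:
--             return False
--     return True
--
-- def backwards_prime(start, stop):
--     pairs = [(n, int(str(n)[::-1])) for n in range(start, stop + 1)]
--     biggest = max((max(n, r) for n, r in pairs), default=0)
--     base = []
--     for c in range(2, math.isqrt(biggest) + 1):
--         if _isp(c, base):
--             base.append(c)
--     return [n for n, r in pairs if _isp(n, base) and r != n and _isp(r, base)]
-- ===== Notes on version B (the rewrite author's own statement) =====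
-- stated objective: faster
-- what changed: Instead of trial-dividing every candidate (and its reversal) by all integers up to its square root, B precomputes the (n, reversed-n) pairs, builds one ascending base-prime table up to the square root of the largest value involved (each new entry tested only against primes already found), and then filters the pairs by dividing only by those base primes.
import Mathlib
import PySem

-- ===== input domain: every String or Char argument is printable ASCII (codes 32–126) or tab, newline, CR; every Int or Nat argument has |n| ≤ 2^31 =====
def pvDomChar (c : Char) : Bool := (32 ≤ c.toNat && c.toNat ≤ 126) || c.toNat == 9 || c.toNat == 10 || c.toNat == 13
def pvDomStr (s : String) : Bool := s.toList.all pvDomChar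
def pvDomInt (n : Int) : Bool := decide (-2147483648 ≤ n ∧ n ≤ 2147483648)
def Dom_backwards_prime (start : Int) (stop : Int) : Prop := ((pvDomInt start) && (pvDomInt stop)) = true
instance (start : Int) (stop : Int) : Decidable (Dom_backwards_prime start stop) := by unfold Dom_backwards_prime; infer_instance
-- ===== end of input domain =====

-- B replaces per-number trial division by all integers with one precomputed ascending base-prime
-- table (sized by the largest value or reversal in play) and divides only by those primes,
-- intending a constant-factor speed-up (fewer trial divisors per candidate).


-- shared transliteration of the identical subexpression `int(str(x)[::-1])` of both sources.
-- str(x)[::-1] never raises (slice? is `some` for step -1) and int(...) never raises on the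
-- reversal of a digit string (x ≥ 0 under Pre_), so the two getD defaults are never observed.
def pyRevStrInt (x : Int) : Int :=
  (PySem.Int.ofStr? ((PySem.Str.slice? (PySem.Int.toStr x) none none (-1)).getD "")).getD 0

-- ===== PORT A =====
-- round(math.sqrt(num)) for 0 ≤ num: CPython's double sqrt is correctly rounded and √num is never
-- within float error of a half-integer for num ≤ 10^10, so the rounded value is exactly
-- `s if num ≤ s²+s else s+1` with s = ⌊√num⌋.  math.sqrt raises on num < 0: excluded by Pre_.
def roundSqrtA (num : Int) : Nat :=
  let s := Nat.sqrt num.toNat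
  if num.toNat ≤ s * s + s then s else s + 1

-- `for i in range(2, round(sqrt(num)) + 1): if num % i == 0: return False` / `return True`
def is_primeA (num : Int) : Bool :=
  (PySem.List.pyRange 2 ((roundSqrtA num : Int) + 1) 1).all fun i => !(PySem.Int.mod num i == 0)

def backwards_prime (start : Int) (stop : Int) : List Int :=
  let primes := (PySem.List.pyRange start (stop + 1) 1).filter is_primeA
  primes.foldl (fun back_primes prime =>
    let back_p := pyRevStrInt prime
    if is_primeA back_p && back_p != prime then back_primes ++ [prime] else back_primes) []

-- ===== PORT B =====
-- `_isp(v, primes)` of Source B: divide only by the listed primes, stopping once p*p > v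
def ispB (v : Int) (primes : List Int) : Bool :=
  match primes with
  | [] => true
  | p :: rest =>
    if p * p > v then true
    else if PySem.Int.mod v p == 0 then false
    else ispB v rest

def backwards_prime_alt (start : Int) (stop : Int) : List Int :=
  let pairs := (PySem.List.pyRange start (stop + 1) 1).map fun n => (n, pyRevStrInt n)
  let biggest := PySem.List.maxD (pairs.map fun nr => max nr.1 nr.2) id 0
  -- math.isqrt(biggest): exact integer sqrt (raises on negatives — unreachable under Pre_)
  let base := (PySem.List.pyRange 2 ((Nat.sqrt biggest.toNat : Int) + 1) 1).foldl
      (fun b c => if ispB c b then b ++ [c] else b) []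
  (pairs.filter fun nr => ispB nr.1 base && nr.2 != nr.1 && ispB nr.2 base).map (·.1)

-- ===== PRECONDITION & SPEC =====
-- Pre_ excludes exactly the inputs where A raises: a nonempty range starting below 0 makes
-- A call math.sqrt on a negative number (ValueError).
def Pre_backwards_prime (start : Int) (stop : Int) : Prop := 0 ≤ start ∨ stop < start
instance (start : Int) (stop : Int) : Decidable (Pre_backwards_prime start stop) := by
  unfold Pre_backwards_prime; infer_instance

def pvWitness_backwards_prime : Int × Int := (1, 100)

def Spec_backwards_prime (start : Int) (stop : Int) (out : List Int) : Prop :=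
  out = backwards_prime_alt start stop
instance (start : Int) (stop : Int) (out : List Int) : Decidable (Spec_backwards_prime start stop out) := by
  unfold Spec_backwards_prime; infer_instance

-- ===== CLAIM (what is proved, stated in full; the proofs are below) =====
def Claim_equal_backwards_prime : Prop := ∀ (start : Int) (stop : Int), Dom_backwards_prime start stop → Pre_backwards_prime start stop → Spec_backwards_prime start stop (backwards_prime start stop)

-- ===== LEMMAS AND PROOFS =====

-- ---------- A-side characterization ----------
lemma roundSqrt_lemma (m : Nat) (h2 : 2 ≤ m) :
    Nat.sqrt m ≤ roundSqrtA (m : Int) ∧ roundSqrtA (m : Int) < m := by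
  unfold roundSqrtA
  simp only [Int.toNat_natCast]
  have hs := Nat.sqrt_lt_self (by omega : 1 < m)
  have hs1 : 1 ≤ Nat.sqrt m := by
    have : 1 * 1 ≤ m := by omega
    rw [← Nat.le_sqrt] at this
    omega
  split <;> constructor <;> try omega
  rename_i hgt
  nlinarith [hs1]

lemma is_primeA_iff (m : Nat) :
    is_primeA (m : Int) = true ↔ (m ≤ 1 ∨ Nat.Prime m) := by
  unfold is_primeA
  rw [List.all_eq_true]
  constructor
  · intro h
    by_cases hm : m ≤ 1
    · exact Or.inl hm
    right
    rw [Nat.prime_def]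
    refine ⟨by omega, ?_⟩
    by_contra hc
    push Not at hc
    have hne1 : m ≠ 1 := by omega
    have hp := Nat.minFac_prime hne1
    have hdvd := Nat.minFac_dvd m
    have hsq : m.minFac ^ 2 ≤ m := Nat.minFac_sq_le_self (by omega) (by
      intro hpr
      rcases hc with ⟨a, ha, hane, hanem⟩
      rcases (Nat.Prime.eq_one_or_self_of_dvd hpr a ha) with h1 | h1 <;> omega)
    have hle : m.minFac ≤ Nat.sqrt m := by
      rw [Nat.le_sqrt]; nlinarith
    obtain ⟨hA, hB⟩ := roundSqrt_lemma m (by omega)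
    have hmem : ((m.minFac : Int)) ∈ PySem.List.pyRange 2 ((roundSqrtA (m:Int) : Int) + 1) 1 := by
      rw [PySem.List.mem_pyRange_one]
      have := Nat.Prime.two_le hp
      refine ⟨by exact_mod_cast this, by omega⟩
    have := h _ hmem
    rw [Bool.not_eq_eq_eq_not, Bool.not_true, beq_eq_false_iff_ne] at this
    exact this (by rw [PySem.Int.mod_eq_zero_iff_dvd]; exact_mod_cast hdvd)
  · intro h i hi
    rw [PySem.List.mem_pyRange_one] at hi
    rw [Bool.not_eq_eq_eq_not, Bool.not_true, beq_eq_false_iff_ne]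
    rw [Ne, PySem.Int.mod_eq_zero_iff_dvd]
    intro hdvd
    have hi2 : 2 ≤ i := hi.1
    have hj : i = ((i.toNat : Nat) : Int) := by omega
    have hjd : i.toNat ∣ m := by
      rw [← Int.natCast_dvd_natCast]; rw [← hj]; exact hdvd
    rcases h with hm | hp
    · -- m ≤ 1: roundSqrtA m ≤ 1, so i ∈ [2, rnd] is impossible
      have h0 : roundSqrtA ((0:Nat) : Int) = 0 := by decide
      have h1 : roundSqrtA ((1:Nat) : Int) = 1 := by decide
      interval_cases m
      · rw [h0] at hi; omega
      · rw [h1] at hi; omega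
    · have := (Nat.Prime.eq_one_or_self_of_dvd hp _ hjd)
      obtain ⟨hA, hB⟩ := roundSqrt_lemma m (Nat.Prime.two_le hp)
      rcases this with h1 | h1 <;> [omega; (rw [h1] at hj; omega)]

-- ---------- B-side: the base-prime table ----------
def primesInt (K : Nat) : List Int :=
  ((List.range (K + 1)).filter fun m => decide (Nat.Prime m)).map fun m : Nat => (m : Int)

lemma primesInt_sorted (K : Nat) : (primesInt K).Pairwise (· ≤ ·) := by
  unfold primesInt
  refine List.Pairwise.map _ ?_ (List.pairwise_lt_range.filter _)
  intro a b h
  have : (a : Int) < (b : Int) := by exact_mod_cast h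
  exact le_of_lt this

lemma mem_primesInt (K : Nat) (p : Int) :
    p ∈ primesInt K ↔ ∃ q : Nat, q ≤ K ∧ Nat.Prime q ∧ p = (q : Int) := by
  unfold primesInt
  simp [List.mem_filter, List.mem_range]
  constructor
  · rintro ⟨q, ⟨hq, hp⟩, rfl⟩; exact ⟨q, by omega, hp, rfl⟩
  · rintro ⟨q, hq, hp, rfl⟩; exact ⟨q, ⟨by omega, hp⟩, rfl⟩

lemma ispB_true_iff (v : Int) (l : List Int) (hs : l.Pairwise (· ≤ ·)) (h0 : ∀ p ∈ l, 0 ≤ p) :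
    (ispB v l = true ↔ ∀ p ∈ l, p * p ≤ v → ¬ (p ∣ v)) := by
  induction l with
  | nil => simp [ispB]
  | cons p t ih =>
    rw [List.pairwise_cons] at hs
    unfold ispB
    by_cases hgt : p * p > v
    · rw [if_pos hgt]
      simp only [true_iff]
      intro q hq hle
      rcases List.mem_cons.mp hq with rfl | hmem
      · omega
      · have hpq := hs.1 q hmem
        have hp0 := h0 p (List.mem_cons_self)
        nlinarith
    · rw [if_neg hgt]
      by_cases hdvd : PySem.Int.mod v p == 0
      · rw [if_pos hdvd]
        refine iff_of_false (by simp) ?_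
        intro hall
        exact hall p List.mem_cons_self (by omega) (by
          rw [← PySem.Int.mod_eq_zero_iff_dvd]; exact_mod_cast (beq_iff_eq.mp hdvd))
      · rw [if_neg hdvd]
        rw [ih hs.2 (fun q hq => h0 q (List.mem_cons_of_mem _ hq))]
        constructor
        · intro hall q hq hle
          rcases List.mem_cons.mp hq with rfl | hmem
          · intro hd
            rw [← PySem.Int.mod_eq_zero_iff_dvd] at hd
            exact hdvd (by simp [hd])
          · exact hall q hmem hle
        · intro hall q hq hle
          exact hall q (List.mem_cons_of_mem _ hq) hle

lemma ispB_prime_iff (v K : Nat) (h : Nat.sqrt v ≤ K) :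
    ispB (v : Int) (primesInt K) = true ↔ (v ≤ 1 ∨ Nat.Prime v) := by
  rw [ispB_true_iff _ _ (primesInt_sorted K)
      (by intro p hp; rcases (mem_primesInt K p).mp hp with ⟨q, _, _, rfl⟩; positivity)]
  constructor
  · intro hall
    by_cases hv : v ≤ 1
    · exact Or.inl hv
    right
    by_contra hnp
    have hq := Nat.minFac_prime (by omega : v ≠ 1)
    have hsq : v.minFac ^ 2 ≤ v := Nat.minFac_sq_le_self (by omega) hnp
    have hqK : v.minFac ≤ K := le_trans (by rw [Nat.le_sqrt]; nlinarith) h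
    have hmem : ((v.minFac : Int)) ∈ primesInt K := (mem_primesInt K _).mpr ⟨_, hqK, hq, rfl⟩
    exact hall _ hmem (by nlinarith) (by exact_mod_cast Nat.minFac_dvd v)
  · intro hP p hp hle hdvd
    rcases (mem_primesInt K p).mp hp with ⟨q, hqK, hq, rfl⟩
    have hq2 := Nat.Prime.two_le hq
    have hqd : q ∣ v := by exact_mod_cast hdvd
    have hqq : q * q ≤ v := by exact_mod_cast hle
    rcases hP with hv | hv
    · nlinarith
    · rcases (Nat.Prime.eq_one_or_self_of_dvd hv q hqd) with h1 | h1 <;> nlinarith [Nat.Prime.two_le hv]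

lemma base_eq (K : Nat) :
    (PySem.List.pyRange 2 ((K : Int) + 1) 1).foldl
      (fun b c => if ispB c b then b ++ [c] else b) [] = primesInt K := by
  induction K with
  | zero => decide
  | succ K ih =>
    rcases Nat.eq_zero_or_pos K with rfl | hK
    · decide
    have hc : ((K + 1 : Nat) : Int) + 1 = ((K : Int) + 1) + 1 := by push_cast; ring
    rw [hc, PySem.List.pyRange_one_succ_right (by omega), List.foldl_append, ih]
    have hsq : Nat.sqrt (K + 1) ≤ K := by
      have : K + 1 < (K + 1) * (K + 1) := by nlinarith
      have := Nat.sqrt_lt.mpr this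
      omega
    have hiff := ispB_prime_iff (K + 1) K hsq
    simp only [List.foldl_cons, List.foldl_nil]
    have hprimesSucc : primesInt (K + 1)
        = primesInt K ++ (if Nat.Prime (K + 1) then [((K + 1 : Nat) : Int)] else []) := by
      unfold primesInt
      rw [List.range_succ, List.filter_append, List.map_append]
      congr 1
      by_cases hp : Nat.Prime (K + 1) <;> simp [hp]
    by_cases hp : Nat.Prime (K + 1)
    · have : ispB (((K + 1 : Nat) : Int)) (primesInt K) = true := hiff.mpr (Or.inr hp)
      rw [hprimesSucc]
      push_cast at this ⊢
      rw [this]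
      simp [hp]
    · have : ispB (((K + 1 : Nat) : Int)) (primesInt K) = false := by
        rcases Bool.eq_false_or_eq_true (ispB (((K + 1 : Nat) : Int)) (primesInt K)) with h | h
        · exact absurd (hiff.mp h) (by push Not; exact ⟨by omega, hp⟩)
        · exact h
      rw [hprimesSucc]
      push_cast at this ⊢
      rw [this]
      simp [hp]

-- ---------- the reversal is nonnegative ----------
lemma dropWhile_isIntSpace_digits (l : List Char) (h : ∀ c ∈ l, c.isDigit) :
    List.dropWhile PySem.Int.isIntSpace l = l := by
  cases l with
  | nil => rfl
  | cons c t =>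
    rw [List.dropWhile_cons, if_neg]
    have hc := h c List.mem_cons_self
    simp only [PySem.Int.isIntSpace]
    revert hc
    simp only [Char.isDigit]
    intro hc
    simp only [Bool.or_eq_true, decide_eq_true_eq] at hc ⊢
    push Not
    refine ⟨⟨⟨⟨⟨?_,?_⟩,?_⟩,?_⟩,?_⟩,?_⟩ <;> rintro rfl <;> revert hc <;> decide

lemma ofChars?_digits_nonneg (ds : List Char) (hd : ∀ c ∈ ds, c.isDigit) :
    0 ≤ (PySem.Int.ofChars? ds).getD 0 := by
  have hrev : ∀ c ∈ ds.reverse, c.isDigit := by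
    intro c hc; exact hd c (List.mem_reverse.mp hc)
  have hstrip : (List.dropWhile PySem.Int.isIntSpace
      (List.dropWhile PySem.Int.isIntSpace ds).reverse).reverse = ds := by
    rw [dropWhile_isIntSpace_digits ds hd, dropWhile_isIntSpace_digits _ hrev, List.reverse_reverse]
  simp only [PySem.Int.ofChars?, hstrip]
  have aux : ∀ (o : Option Nat),
      0 ≤ (Option.map (fun n : Int => n) (o.bind fun a => pure ((a : Nat) : Int))).getD 0 := by
    intro o; cases o <;> simp
  split
  all_goals try exact aux _
  all_goals rename_i t heq
  all_goals exact absurd (hd _ List.mem_cons_self) (by decide)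

lemma pyRevStrInt_nonneg (n : Int) (h : 0 ≤ n) : 0 ≤ pyRevStrInt n := by
  unfold pyRevStrInt
  rw [PySem.Str.slice?_none_none_neg_one, Option.getD_some, PySem.Int.ofStr?_ofList,
      PySem.Int.toList_toStr]
  refine ofChars?_digits_nonneg _ ?_
  intro c hc
  rw [List.mem_reverse] at hc
  unfold PySem.Int.toChars at hc
  rw [if_neg (by omega)] at hc
  exact Nat.isDigit_of_mem_toDigits (by omega) (by omega) hc

lemma le_maxD_of_mem (xs : List Int) (y : Int) (h : y ∈ xs) :
    y ≤ PySem.List.maxD xs id 0 := by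
  unfold PySem.List.maxD
  cases hm : PySem.List.max? xs id with
  | none =>
    rw [PySem.List.max?_eq_none_iff] at hm
    subst hm; cases h
  | some m =>
    simpa using PySem.List.max?_isMax hm y h

lemma pyRange_nil_of_le (a b : Int) (h : b ≤ a) : PySem.List.pyRange a b 1 = [] := by
  simp [PySem.List.pyRange]; omega

theorem main_thm : ∀ (start stop : Int), (0 ≤ start ∨ stop < start) →
    backwards_prime start stop = backwards_prime_alt start stop := by
  intro start stop hpre
  by_cases hes : stop + 1 ≤ start
  · -- the range is empty (covers both Pre_ cases when stop < start)
    simp only [backwards_prime, backwards_prime_alt]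
    rw [pyRange_nil_of_le _ _ hes]
    simp
  have hstart : 0 ≤ start := by
    rcases hpre with h | h
    · exact h
    · omega
  simp only [backwards_prime, backwards_prime_alt]
  set R := PySem.List.pyRange start (stop + 1) 1 with hR
  set g : Int → Int × Int := fun n => (n, pyRevStrInt n) with hg
  set biggest := PySem.List.maxD ((R.map g).map fun nr => max nr.1 nr.2) id 0 with hbig
  set K := Nat.sqrt biggest.toNat with hK
  have hbase := base_eq K
  have hmem : ∀ n ∈ R, 0 ≤ n ∧ n ≤ biggest ∧ pyRevStrInt n ≤ biggest := by
    intro n hn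
    rw [hR, PySem.List.mem_pyRange_one] at hn
    have h0 : 0 ≤ n := by omega
    have hin : max n (pyRevStrInt n) ∈ (R.map g).map fun nr => max nr.1 nr.2 := by
      rw [List.map_map]
      refine List.mem_map.mpr ⟨n, ?_, by simp [hg]⟩
      rw [hR, PySem.List.mem_pyRange_one]; omega
    have := le_maxD_of_mem _ _ hin
    exact ⟨h0, by omega, by omega⟩
  have agree : ∀ v : Int, 0 ≤ v → v ≤ biggest → is_primeA v = ispB v (primesInt K) := by
    intro v h0 hM
    have hsq : Nat.sqrt v.toNat ≤ K := by
      rw [hK]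
      exact Nat.sqrt_le_sqrt (Int.toNat_le_toNat hM)
    have hv : v = ((v.toNat : Nat) : Int) := by omega
    rw [hv, Bool.eq_iff_iff, is_primeA_iff, ispB_prime_iff v.toNat K hsq]
  rw [hbase]
  have hA := PySem.List.foldl_append_if
      (fun prime => is_primeA (pyRevStrInt prime) && pyRevStrInt prime != prime)
      (fun x => x) (List.filter is_primeA R) []
  rw [hA, List.nil_append, List.map_id', List.filter_filter, List.filter_map, List.map_map]
  have hproj : ((fun x : Int × Int => x.1) ∘ g) = fun n : Int => n := by
    funext n; simp [hg]
  rw [hproj, List.map_id']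
  refine List.filter_congr ?_
  intro n hn
  obtain ⟨h0, hnM, hrM⟩ := hmem n hn
  have hr0 : 0 ≤ pyRevStrInt n := pyRevStrInt_nonneg n h0
  have e1 : is_primeA n = ispB n (primesInt K) := agree n h0 hnM
  have e2 : is_primeA (pyRevStrInt n) = ispB (pyRevStrInt n) (primesInt K) := agree _ hr0 hrM
  simp only [Function.comp_apply, hg, e1, e2]
  cases ispB n (primesInt K) <;> cases ispB (pyRevStrInt n) (primesInt K)
    <;> cases pyRevStrInt n != n <;> rfl

-- ===== VERDICT (by name: the statement is the Claim_ definition above) =====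
theorem backwards_prime_spec : Claim_equal_backwards_prime := by
  intro start stop _ hpre
  unfold Pre_backwards_prime at hpre
  unfold Spec_backwards_prime
  exact main_thm start stop hpre
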